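-- pv_equiv track=rewrite | github.com/ECSIS-lab/CiC_KUTH24 | utils_RRLD.py | LinearlyDecompose
-- ===== SOURCE A (Python) =====
-- def LinearlyDecompose(eq):
--     # Linearly decompose polynomial eq into three polynomials
--     # poly_f: key polynomial | poly_g: IV polynomial | poly_h: non-linear key-IV polynomials
--
--     poly_f = []
--     poly_g = []
--     poly_h = []
--
--     if type(eq)==str:
--         eq = eq.split(' + ')
--
--     # Decompose by the number of '(' and ')'
--     left_num = 0
--     right_num = 0
--     partial_eq = []
--
--     for tar_term in eq:
--         left_num += tar_term.count('(')
--         right_num += tar_term.count(')')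
--
--         if left_num==right_num:
--             if partial_eq:
--                 partial_eq.append(tar_term)
--                 new_eq = ' + '.join(partial_eq)
--                 partial_eq.clear()
--             else:
--                 new_eq = tar_term
--
--             if 'k' in new_eq and 'v' in new_eq:
--                 poly_h.append(new_eq)
--             elif 'k' in new_eq or new_eq=='1':
--                 poly_f.append(new_eq)
--             elif 'v' in new_eq:
--                 poly_g.append(new_eq)
--         else:
--             partial_eq.append(tar_term)
--
--     return poly_f, poly_g, poly_h
-- ===== SOURCE B (Python) =====
-- def LinearlyDecompose(eq):
--     # B: character-level scan of the equation string: split it at the ' + '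
--     # separators that occur at parenthesis depth 0 (complete sub-expressions),
--     # then tag each piece once and distribute the pieces by tag.
--     groups = []
--     buf = []
--     depth = 0
--     i = 0
--     n = len(eq)
--     while i < n:
--         if eq.startswith(' + ', i):
--             if depth == 0:
--                 groups.append(''.join(buf))
--                 buf = []
--             else:
--                 buf.append(' + ')
--             i += 3
--         else:
--             c = eq[i]
--             if c == '(':
--                 depth += 1
--             elif c == ')':
--                 depth -= 1
--             buf.append(c)
--             i += 1
--     if depth == 0:
--         groups.append(''.join(buf))
--
--     def tag(s):
--         if 'k' in s and 'v' in s: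
--             return 2
--         if 'k' in s or s == '1':
--             return 0
--         if 'v' in s:
--             return 1
--         return 3
--
--     tagged = [(tag(s), s) for s in groups]
--     return ([s for t, s in tagged if t == 0],
--             [s for t, s in tagged if t == 1],
--             [s for t, s in tagged if t == 2])
-- ===== Notes on version B (the rewrite author's own statement) =====
-- stated objective: alternative
-- what changed: A splits the string into a term list and runs one loop over the terms with two cumulative open/close-parenthesis counters, buffering and re-joining terms and classifying inline; B never splits or joins: it scans the original string character by character with a single depth counter, cutting it at the space-plus-space separators that occur at parenthesis depth zero, then tags each resulting piece once and builds the three output lists by filtering on the tag.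
import Mathlib
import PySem

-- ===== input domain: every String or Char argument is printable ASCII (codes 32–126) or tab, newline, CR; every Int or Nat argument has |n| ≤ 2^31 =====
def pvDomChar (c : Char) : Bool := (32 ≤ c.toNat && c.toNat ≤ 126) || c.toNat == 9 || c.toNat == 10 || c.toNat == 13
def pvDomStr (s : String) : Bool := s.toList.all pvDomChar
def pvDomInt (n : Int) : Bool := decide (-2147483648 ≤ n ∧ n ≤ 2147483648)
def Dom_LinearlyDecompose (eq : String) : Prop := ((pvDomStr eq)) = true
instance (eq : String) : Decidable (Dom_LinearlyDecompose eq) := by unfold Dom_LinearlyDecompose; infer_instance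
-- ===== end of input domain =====

-- B replaces A's term-list algorithm (split on the separator, per-term parenthesis
-- counters, buffered re-join, inline classification) by a character-level scan that cuts
-- the original string at the separators occurring at parenthesis depth zero, then tags
-- each piece once and distributes the pieces by tag; objective: alternative (same cost).

-- ===== PORT A =====
-- A's loop state: ((poly_f, poly_g, poly_h), left_num, right_num, partial_eq)
def pvAStep (st : (List String × List String × List String) × Nat × Nat × List String)
    (tar : String) : (List String × List String × List String) × Nat × Nat × List String :=
  let f := st.1.1; let g := st.1.2.1; let h := st.1.2.2
  let l := st.2.1 + PySem.Str.count tar "("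
  let r := st.2.2.1 + PySem.Str.count tar ")"
  let part := st.2.2.2
  if l = r then
    let newEq := if part ≠ [] then PySem.Str.join " + " (part ++ [tar]) else tar
    if PySem.Str.isIn "k" newEq && PySem.Str.isIn "v" newEq then
      ((f, g, h ++ [newEq]), l, r, [])
    else if PySem.Str.isIn "k" newEq || newEq == "1" then
      ((f ++ [newEq], g, h), l, r, [])
    else if PySem.Str.isIn "v" newEq then
      ((f, g ++ [newEq], h), l, r, [])
    else ((f, g, h), l, r, [])
  else ((f, g, h), l, r, part ++ [tar])

def LinearlyDecompose (eq : String) : List String × List String × List String :=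
  -- eq.split(' + '): sep is the nonempty literal " + ", so split? is always `some`
  let terms := (PySem.Str.split? eq " + ").getD []
  (terms.foldl pvAStep (([], [], []), 0, 0, [])).1

-- ===== PORT B =====
-- the separator ' + ' as characters
def pvSEP : List Char := [' ', '+', ' ']

-- Source B's while-loop: walk the characters; at a top-level ' + ' emit the buffer as a group,
-- inside parentheses keep the separator in the buffer; at the end emit iff depth == 0.
def pvScanB (cs : List Char) (d : Int) (buf : List Char) (gs : List (List Char)) :
    List (List Char) :=
  match cs with
  | [] => if d = 0 then gs ++ [buf] else gs
  | c :: rest =>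
    if pvSEP.isPrefixOf (c :: rest) then
      if d = 0 then pvScanB (rest.drop 2) 0 [] (gs ++ [buf])
      else pvScanB (rest.drop 2) d (buf ++ pvSEP) gs
    else
      pvScanB rest (if c = '(' then d + 1 else if c = ')' then d - 1 else d) (buf ++ [c]) gs
termination_by cs.length
decreasing_by
  all_goals simp [List.length_drop, List.length_cons]

-- Source B's tag(s)
def pvTag (s : List Char) : Nat :=
  if PySem.Chars.isIn ['k'] s && PySem.Chars.isIn ['v'] s then 2
  else if PySem.Chars.isIn ['k'] s || s = ['1'] then 0
  else if PySem.Chars.isIn ['v'] s then 1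
  else 3

-- Source B's tagged list + the three comprehensions
def pvFilt (groups : List (List Char)) : List String × List String × List String :=
  let tagged := groups.map (fun s => (pvTag s, s))
  ((tagged.filter (fun p => p.1 == 0)).map (fun p => String.ofList p.2),
   (tagged.filter (fun p => p.1 == 1)).map (fun p => String.ofList p.2),
   (tagged.filter (fun p => p.1 == 2)).map (fun p => String.ofList p.2))

def LinearlyDecompose_alt (eq : String) : List String × List String × List String :=
  pvFilt (pvScanB eq.toList 0 [] [])

-- ===== PRECONDITION & SPEC =====
def Spec_LinearlyDecompose (eq : String) (out : List String × List String × List String) : Prop := out = LinearlyDecompose_alt eq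
instance (eq : String) (out : List String × List String × List String) : Decidable (Spec_LinearlyDecompose eq out) := by unfold Spec_LinearlyDecompose; infer_instance

-- ===== CLAIM (what is proved, stated in full; the proofs are below) =====
def Claim_equal_LinearlyDecompose : Prop := ∀ (eq : String), Dom_LinearlyDecompose eq → Spec_LinearlyDecompose eq (LinearlyDecompose eq)

-- ===== LEMMAS AND PROOFS =====

-- proof-side reference: A's algorithm refactored into segmentation + classification
-- (term-level segmentation, String buffers)
def pvSegStep (st : List String × Int × List String) (t : String) :
    List String × Int × List String :=
  let bal := st.2.1 + (PySem.Str.count t "(" : Int) - (PySem.Str.count t ")" : Int)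
  let buf := st.2.2 ++ [t]
  if bal = 0 then (st.1 ++ [PySem.Str.join " + " buf], 0, []) else (st.1, bal, buf)

def pvClassify (acc : List String × List String × List String) (s : String) :
    List String × List String × List String :=
  if PySem.Str.isIn "k" s && PySem.Str.isIn "v" s then (acc.1, acc.2.1, acc.2.2 ++ [s])
  else if PySem.Str.isIn "k" s || s == "1" then (acc.1 ++ [s], acc.2.1, acc.2.2)
  else if PySem.Str.isIn "v" s then (acc.1, acc.2.1 ++ [s], acc.2.2)
  else acc

-- proof-side reference for B: a clean structural version of Python's str.split(' + ')
def pvSplit (cs : List Char) : List (List Char) :=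
  match cs with
  | [] => [[]]
  | c :: rest =>
    if pvSEP.isPrefixOf (c :: rest) then [] :: pvSplit (rest.drop 2)
    else (pvSplit rest).modifyHead (c :: ·)
termination_by cs.length
decreasing_by
  all_goals simp [List.length_drop, List.length_cons]

-- term-level segmentation with a char buffer (what pvScanB computes on the term list)
def pvSegS (ts : List (List Char)) (d : Int) (buf : List Char) (gs : List (List Char)) :
    List (List Char) :=
  match ts with
  | [] => gs
  | t :: ts =>
    let d' := d + (t.count '(' : Int) - (t.count ')' : Int)
    if d' = 0 then pvSegS ts 0 [] (gs ++ [buf ++ t])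
    else pvSegS ts d' ((buf ++ t) ++ pvSEP) gs

-- the char buffer corresponding to A's partial_eq
def pvBufOf (part : List String) : List Char :=
  if part = [] then [] else pvSEP.intercalate (part.map String.toList) ++ pvSEP

-- PySem.Chars.count with a single-character needle is List.count
lemma pvCountGo (p : Char) (l : List Char) (fuel acc : Nat) (h : l.length ≤ fuel) :
    PySem.Chars.count.go [p] fuel l acc = acc + l.count p := by
  induction l generalizing fuel acc with
  | nil => rw [PySem.Chars.count.go.eq_def]; cases fuel <;> simp
  | cons c rest ih =>
    cases fuel with
    | zero => simp at h
    | succ fuel =>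
      have hr : rest.length ≤ fuel := by simp at h; omega
      rw [PySem.Chars.count.go.eq_def]
      simp only [List.isPrefixOf_cons₂, List.isPrefixOf_nil_left, Bool.and_true]
      by_cases hc : p = c
      · subst hc
        rw [if_pos (by simp)]
        rw [show List.drop [p].length (p :: rest) = rest from rfl]
        rw [ih fuel (acc + 1) hr]
        simp
        omega
      · rw [if_neg (by simp [hc])]
        rw [ih fuel acc hr]
        simp [Ne.symm hc]

lemma pvCountSingleton (l : List Char) (p : Char) :
    PySem.Chars.count l [p] = l.count p := by
  simp [PySem.Chars.count, pvCountGo p l l.length 0 le_rfl]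

lemma pvSplit_ne_nil_aux (n : Nat) : ∀ cs : List Char, cs.length ≤ n → pvSplit cs ≠ [] := by
  induction n with
  | zero =>
    intro cs h
    have : cs = [] := by cases cs <;> simp_all
    subst this
    rw [pvSplit.eq_def]; simp
  | succ n ih =>
    intro cs h
    cases cs with
    | nil => rw [pvSplit.eq_def]; simp
    | cons c rest =>
      rw [pvSplit.eq_def]
      simp only [List.isPrefixOf_iff_prefix]
      by_cases hp : pvSEP <+: (c :: rest)
      · rw [if_pos hp]; simp
      · rw [if_neg hp]
        have h2 := ih rest (by simp at h; omega)
        cases h3 : pvSplit rest with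
        | nil => exact absurd h3 h2
        | cons t ts => simp [List.modifyHead]

lemma pvSplit_ne_nil (cs : List Char) : pvSplit cs ≠ [] :=
  pvSplit_ne_nil_aux cs.length cs le_rfl

-- spec of PySem's fuel-based splitOn.go in terms of pvSplit
lemma pvSplitGo (fuel : Nat) (l : List Char) (cur : List Char) (acc : List (List Char))
    (h : l.length ≤ fuel) :
    PySem.Chars.splitOn.go pvSEP fuel l cur acc
      = acc.reverse ++ (pvSplit l).modifyHead (cur.reverse ++ ·) := by
  induction fuel using Nat.strong_induction_on generalizing l cur acc with
  | _ fuel ih =>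
    match fuel, l with
    | 0, l =>
      have hl : l = [] := by cases l <;> simp_all
      subst hl
      rw [PySem.Chars.splitOn.go.eq_def, pvSplit.eq_def]
      simp
    | fuel + 1, [] =>
      rw [PySem.Chars.splitOn.go.eq_def, pvSplit.eq_def]
      simp
    | fuel + 1, c :: rest =>
      have hr : rest.length ≤ fuel := by simp at h; omega
      rw [PySem.Chars.splitOn.go.eq_def]
      simp only [List.isPrefixOf_iff_prefix]
      by_cases hp : pvSEP <+: (c :: rest)
      · rw [if_pos hp]
        have hlen : (List.drop pvSEP.length (c :: rest)).length ≤ fuel := by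
          simp only [pvSEP, List.length_drop, List.length_cons]
          simp
          omega
        rw [ih fuel (by omega) _ [] (cur.reverse :: acc) hlen]
        conv_rhs => rw [pvSplit.eq_def]
        simp only [List.isPrefixOf_iff_prefix]
        rw [if_pos hp]
        rw [show List.drop pvSEP.length (c :: rest) = rest.drop 2 from rfl]
        cases h2 : pvSplit (rest.drop 2) with
        | nil => exact absurd h2 (pvSplit_ne_nil _)
        | cons t ts => simp [List.modifyHead]
      · rw [if_neg hp]
        rw [ih fuel (by omega) rest (c :: cur) acc hr]
        conv_rhs => rw [pvSplit.eq_def]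
        simp only [List.isPrefixOf_iff_prefix]
        rw [if_neg hp]
        cases h2 : pvSplit rest with
        | nil => exact absurd h2 (pvSplit_ne_nil _)
        | cons t ts => simp [List.modifyHead]

lemma pvSplitOn_eq (cs : List Char) : PySem.Chars.splitOn cs pvSEP = pvSplit cs := by
  rw [PySem.Chars.splitOn, pvSplitGo (cs.length + 1) cs [] [] (by omega)]
  cases h : pvSplit cs with
  | nil => exact absurd h (pvSplit_ne_nil _)
  | cons t ts => simp [List.modifyHead]

-- prepending one non-separator character to the first term commutes with segmentation
lemma pvSegS_cons_char (c : Char) (t : List Char) (ts : List (List Char)) (d : Int)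
    (buf : List Char) (gs : List (List Char)) :
    pvSegS ((c :: t) :: ts) d buf gs
      = pvSegS (t :: ts) (if c = '(' then d + 1 else if c = ')' then d - 1 else d)
          (buf ++ [c]) gs := by
  have hd : d + ((c :: t).count '(' : Int) - ((c :: t).count ')' : Int)
      = (if c = '(' then d + 1 else if c = ')' then d - 1 else d)
        + (t.count '(' : Int) - (t.count ')' : Int) := by
    by_cases h1 : c = '('
    · subst h1; simp; omega
    · by_cases h2 : c = ')'
      · subst h2; simp [h1]; omega
      · simp [h1, h2]
  simp only [pvSegS, hd, List.append_assoc, List.cons_append, List.nil_append]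

-- B's character scan computes term-level segmentation of the split
lemma pvScan_eq_segS (n : Nat) (cs : List Char) (hn : cs.length ≤ n) (d : Int)
    (buf : List Char) (gs : List (List Char)) :
    pvScanB cs d buf gs = pvSegS (pvSplit cs) d buf gs := by
  induction n generalizing cs d buf gs with
  | zero =>
    have hl : cs = [] := by cases cs <;> simp_all
    subst hl
    rw [pvScanB.eq_def, pvSplit.eq_def]
    simp only [pvSegS, List.count_nil, Nat.cast_zero, add_zero, sub_zero, List.append_nil]
  | succ n ih =>
    cases cs with
    | nil =>
      rw [pvScanB.eq_def, pvSplit.eq_def]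
      simp only [pvSegS, List.count_nil, Nat.cast_zero, add_zero, sub_zero, List.append_nil]
    | cons c rest =>
      have hr : rest.length ≤ n := by simp at hn; omega
      rw [pvScanB.eq_def, pvSplit.eq_def]
      simp only [List.isPrefixOf_iff_prefix]
      by_cases hp : pvSEP <+: (c :: rest)
      · rw [if_pos hp, if_pos hp]
        obtain ⟨t, ht⟩ := hp
        rw [pvSEP] at ht
        injection ht with h1 h2
        subst h1
        have hrest : rest = '+' :: ' ' :: t := h2.symm
        subst hrest
        have htlen : (('+' :: ' ' :: t).drop 2).length ≤ n := by
          simp at hn ⊢; omega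
        by_cases hd : d = 0
        · subst hd
          rw [if_pos rfl]
          rw [ih _ htlen 0 [] (gs ++ [buf])]
          simp [pvSegS]
        · rw [if_neg hd]
          rw [ih _ htlen d (buf ++ pvSEP) gs]
          simp only [pvSegS, List.count_nil, Nat.cast_zero, add_zero, sub_zero,
            if_neg hd, List.append_nil]
      · rw [if_neg hp, if_neg hp]
        rw [ih rest hr _ (buf ++ [c]) gs]
        cases h2 : pvSplit rest with
        | nil => exact absurd h2 (pvSplit_ne_nil _)
        | cons t ts =>
          simp only [List.modifyHead]
          rw [pvSegS_cons_char]

-- intercalate over an appended last element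
lemma pvInterAppend (l : List (List Char)) (x : List Char) (h : l ≠ []) :
    pvSEP.intercalate (l ++ [x]) = pvSEP.intercalate l ++ pvSEP ++ x := by
  induction l with
  | nil => simp at h
  | cons t ts ih =>
    cases ts with
    | nil => simp [List.intercalate, List.intersperse_cons₂]
    | cons u us =>
      have h3 := ih (List.cons_ne_nil _ _)
      have e1 : pvSEP.intercalate ((t :: u :: us) ++ [x])
          = t ++ pvSEP ++ pvSEP.intercalate ((u :: us) ++ [x]) := by
        cases us <;> simp [List.intercalate, List.intersperse_cons₂, List.append_assoc]
      have e2 : pvSEP.intercalate (t :: u :: us)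
          = t ++ pvSEP ++ pvSEP.intercalate (u :: us) := by
        simp [List.intercalate, List.intersperse_cons₂]
      rw [e1, h3, e2]
      simp [List.append_assoc]

lemma pvBufOf_append (part : List String) (t : List Char) :
    pvSEP.intercalate (part.map String.toList ++ [t]) = pvBufOf part ++ t := by
  by_cases h : part = []
  · subst h; simp [pvBufOf, List.intercalate]
  · rw [pvBufOf, if_neg h, pvInterAppend _ t (by simpa using h)]

-- char-level segmentation equals A-style String-level segmentation
lemma pvBridge (ts : List (List Char)) (d : Int) (part : List String) (gs : List String) :
    pvSegS ts d (pvBufOf part) (gs.map String.toList)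
      = ((ts.map String.ofList).foldl pvSegStep (gs, d, part)).1.map String.toList := by
  induction ts generalizing d part gs with
  | nil => simp [pvSegS]
  | cons t ts ih =>
    simp only [List.map_cons, List.foldl_cons, pvSegS, pvSegStep]
    have h1 : (PySem.Str.count (String.ofList t) "(" : Int) = (t.count '(' : Int) := by
      simp [pvCountSingleton]
    have h2 : (PySem.Str.count (String.ofList t) ")" : Int) = (t.count ')' : Int) := by
      simp [pvCountSingleton]
    rw [h1, h2]
    by_cases hz : d + (t.count '(' : Int) - (t.count ')' : Int) = 0
    · rw [if_pos hz, if_pos hz]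
      have hjoin : (gs.map String.toList) ++ [pvBufOf part ++ t]
          = (gs ++ [PySem.Str.join " + " (part ++ [String.ofList t])]).map String.toList := by
        simp only [List.map_append, List.map_cons, List.map_nil]
        congr 1
        rw [PySem.Str.join]
        simp only [String.toList_ofList, PySem.Chars.join]
        rw [show (" + " : String).toList = pvSEP from rfl]
        simp only [List.map_append, List.map_cons, List.map_nil, String.toList_ofList]
        rw [pvBufOf_append]
      rw [hjoin]
      have := ih 0 [] (gs ++ [PySem.Str.join " + " (part ++ [String.ofList t])])
      simpa [pvBufOf] using this
    · rw [if_neg hz, if_neg hz]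
      have hbuf : (pvBufOf part ++ t) ++ pvSEP = pvBufOf (part ++ [String.ofList t]) := by
        conv_rhs => rw [pvBufOf]
        rw [if_neg (by simp)]
        simp only [List.map_append, List.map_cons, List.map_nil, String.toList_ofList]
        rw [pvBufOf_append]
      rw [hbuf]
      exact ih _ _ gs

-- A-side: segmentation only appends to the groups accumulator
lemma pvSeg_groups_prefix (ts : List String) (gs : List String) (bal : Int) (buf : List String) :
    (ts.foldl pvSegStep (gs, bal, buf)).1 = gs ++ (ts.foldl pvSegStep ([], bal, buf)).1 := by
  induction ts generalizing gs bal buf with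
  | nil => simp
  | cons t ts ih =>
    simp only [List.foldl_cons, pvSegStep]
    split
    · simp only [List.nil_append]
      rw [ih, ih (gs := [_])]; simp
    · exact ih gs _ _

-- main invariant: A's loop from state ((f,g,h), l, r, part) equals classifying the groups
-- the segmentation emits from balance l - r and buffer part
lemma pvMain (ts : List String) (fgh : List String × List String × List String)
    (l r : Nat) (part : List String) :
    (ts.foldl pvAStep (fgh, l, r, part)).1
      = (ts.foldl pvSegStep ([], (l : Int) - (r : Int), part)).1.foldl pvClassify fgh := by
  induction ts generalizing fgh l r part with
  | nil => simp
  | cons t ts ih =>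
    simp only [List.foldl_cons]
    by_cases hq : l + PySem.Chars.count t.toList ['('] = r + PySem.Chars.count t.toList [')']
    · have hz : (l : Int) - (r : Int) + (PySem.Chars.count t.toList ['('] : Int)
          - (PySem.Chars.count t.toList [')'] : Int) = 0 := by omega
      have hA : pvAStep (fgh, l, r, part) t
          = (pvClassify fgh (PySem.Str.join " + " (part ++ [t])),
             l + PySem.Chars.count t.toList ['('], r + PySem.Chars.count t.toList [')'], []) := by
        by_cases hp : part = []
        · subst hp
          simp [pvAStep, pvClassify, hq, PySem.Str.join]
          split_ifs <;> rfl
        · simp [pvAStep, pvClassify, hq, hp]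
          split_ifs <;> rfl
      have hB : pvSegStep ([], (l : Int) - (r : Int), part) t
          = ([PySem.Str.join " + " (part ++ [t])], 0, []) := by
        simp [pvSegStep, hz]
      rw [hA, hB, ih]
      rw [pvSeg_groups_prefix ts [_] 0 []]
      have h0 : ((l + PySem.Chars.count t.toList ['('] : Nat) : Int)
          - ((r + PySem.Chars.count t.toList [')'] : Nat) : Int) = 0 := by omega
      rw [h0]
      simp
    · have hz : (l : Int) - (r : Int) + (PySem.Chars.count t.toList ['('] : Int)
          - (PySem.Chars.count t.toList [')'] : Int) ≠ 0 := by omega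
      have hA : pvAStep (fgh, l, r, part) t
          = (fgh, l + PySem.Chars.count t.toList ['('], r + PySem.Chars.count t.toList [')'], part ++ [t]) := by
        simp [pvAStep, hq]
      have hbal : (l : Int) - (r : Int) + (PySem.Chars.count t.toList ['('] : Int)
          - (PySem.Chars.count t.toList [')'] : Int)
          = ((l + PySem.Chars.count t.toList ['('] : Nat) : Int)
            - ((r + PySem.Chars.count t.toList [')'] : Nat) : Int) := by push_cast; ring
      have hB : pvSegStep ([], (l : Int) - (r : Int), part) t
          = ([], ((l + PySem.Chars.count t.toList ['('] : Nat) : Int)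
                 - ((r + PySem.Chars.count t.toList [')'] : Nat) : Int), part ++ [t]) := by
        simp [pvSegStep, hbal]
        omega
      rw [hA, hB, ih]

-- unfolding pvFilt over the head group
lemma pvFilt_cons (x : List Char) (xs : List (List Char)) :
    pvFilt (x :: xs)
      = ((if pvTag x = 0 then [String.ofList x] else []) ++ (pvFilt xs).1,
         (if pvTag x = 1 then [String.ofList x] else []) ++ (pvFilt xs).2.1,
         (if pvTag x = 2 then [String.ofList x] else []) ++ (pvFilt xs).2.2) := by
  simp only [pvFilt, List.map_cons, List.filter_cons]
  by_cases h0 : pvTag x = 0 <;> by_cases h1 : pvTag x = 1 <;> by_cases h2 : pvTag x = 2 <;>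
    simp_all

-- the tag-and-filter pass equals the fold with the classification chain
lemma pvFilt_eq_classify (gs : List String) (f g h : List String) :
    gs.foldl pvClassify (f, g, h)
      = (f ++ (pvFilt (gs.map String.toList)).1,
         g ++ (pvFilt (gs.map String.toList)).2.1,
         h ++ (pvFilt (gs.map String.toList)).2.2) := by
  induction gs generalizing f g h with
  | nil => simp [pvFilt]
  | cons s ss ih =>
    simp only [List.map_cons, List.foldl_cons, pvFilt_cons, String.ofList_toList]
    have ek : PySem.Chars.isIn ['k'] s.toList = PySem.Str.isIn "k" s := by simp
    have ev : PySem.Chars.isIn ['v'] s.toList = PySem.Str.isIn "v" s := by simp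
    have e1 : (s.toList = ['1']) = (s = "1") := by
      simp [String.ext_iff]
    by_cases hk : PySem.Str.isIn "k" s = true <;> by_cases hv : PySem.Str.isIn "v" s = true <;>
      by_cases h1 : s = "1" <;>
      · simp only [pvClassify, pvTag, ek, ev, e1, hk, hv, h1]
        simp_all

-- ===== VERDICT (by name: the statement is the Claim_ definition above) =====
theorem LinearlyDecompose_spec : Claim_equal_LinearlyDecompose := by
  intro eq _
  unfold Spec_LinearlyDecompose LinearlyDecompose LinearlyDecompose_alt
  have hterms : (PySem.Str.split? eq " + ").getD []
      = (pvSplit eq.toList).map String.ofList := by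
    simp only [PySem.Str.split?, PySem.Chars.split?]
    rw [show (" + " : String).toList = pvSEP from rfl]
    rw [if_neg (by simp [pvSEP])]
    simp [pvSplitOn_eq]
  rw [hterms]
  rw [pvMain _ ([], [], []) 0 0 []]
  rw [show ((0 : Nat) : Int) - ((0 : Nat) : Int) = (0 : Int) by norm_num]
  rw [pvFilt_eq_classify _ [] [] []]
  rw [pvScan_eq_segS eq.toList.length eq.toList le_rfl 0 [] []]
  have hb := pvBridge (pvSplit eq.toList) 0 [] []
  rw [show pvBufOf [] = [] from rfl] at hb
  rw [show (([] : List String).map String.toList) = ([] : List (List Char)) from rfl] at hb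
  rw [hb]
  simp
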